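-- pv_equiv track=rewrite | github.com/ukeSJTU/build-your-own-shell | app/main.py | parse_pipeline
-- ===== SOURCE A (Python) =====
-- def parse_pipeline(tokens):
--     # Convert a list of tokens into a list of commands separated by '|'
--     # Given tokens: ['ls', '-l', '|', 'grep', 'py']
--     # Return: [['ls', '-l'], ['grep', 'py']]
--     if "|" not in tokens:
--         return [tokens]
--
--     commands = []
--     current_cmd = []
--
--     for token in tokens:
--         if token == "|":
--             if current_cmd:
--                 commands.append(current_cmd)
--             current_cmd = []
--         else:
--             current_cmd.append(token)
--
--     if current_cmd:
--         commands.append(current_cmd)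
--
--     return commands
-- ===== SOURCE B (Python) =====
-- def _split(tokens):
--     # Recursively split at the FIRST pipe: head before it, recurse on the rest.
--     if "|" not in tokens:
--         return [tokens] if tokens else []
--     i = tokens.index("|")
--     head = tokens[:i]
--     rest = _split(tokens[i + 1:])
--     return [head] + rest if head else rest
--
--
-- def parse_pipeline(tokens):
--     if "|" not in tokens:
--         return [tokens]
--     return _split(tokens)
-- ===== Notes on version B (the rewrite author's own statement) =====
-- stated objective: alternative
-- what changed: Replaced the token-at-a-time accumulator loop with a recursive divide-at-first-pipe decomposition: find the first '|' with index, slice off the head segment, and recurse on the remainder.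
import Mathlib
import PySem

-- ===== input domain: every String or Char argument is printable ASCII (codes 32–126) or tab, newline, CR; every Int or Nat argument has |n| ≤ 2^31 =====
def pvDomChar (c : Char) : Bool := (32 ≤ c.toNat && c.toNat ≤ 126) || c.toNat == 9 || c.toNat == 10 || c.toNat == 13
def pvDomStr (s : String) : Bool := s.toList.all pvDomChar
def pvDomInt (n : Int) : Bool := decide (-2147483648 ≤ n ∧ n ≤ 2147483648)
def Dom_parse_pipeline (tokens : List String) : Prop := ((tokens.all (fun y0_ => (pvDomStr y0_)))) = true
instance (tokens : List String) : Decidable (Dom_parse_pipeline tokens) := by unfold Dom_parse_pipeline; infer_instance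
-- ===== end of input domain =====

-- B replaces A's token-at-a-time accumulator loop with a recursive divide-at-first-pipe
-- decomposition (index + slices); same cost, alternative structure. Return values only.

-- ===== PORT A =====
-- one loop step of A: (commands, current_cmd) updated by one token
def pvStepA (s : List (List String) × List String) (token : String) :
    List (List String) × List String :=
  if token = "|" then
    (if s.2 ≠ [] then s.1 ++ [s.2] else s.1, [])
  else
    (s.1, s.2 ++ [token])

def parse_pipeline (tokens : List String) : List (List String) :=
  if "|" ∉ tokens then [tokens]
  else
    let st := tokens.foldl pvStepA ([], [])
    if st.2 ≠ [] then st.1 ++ [st.2] else st.1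

-- ===== PORT B =====
-- helper _split of Source B: split at the first pipe, recurse on the remainder
def pvSplit (tokens : List String) : List (List String) :=
  match h : PySem.List.index? tokens "|" with
  | none => if tokens ≠ [] then [tokens] else []
  | some i =>
      let head := PySem.List.slice tokens none (some (i : Int))
      let rest := pvSplit (PySem.List.slice tokens (some ((i : Int) + 1)) none)
      if head ≠ [] then head :: rest else rest
termination_by tokens.length
decreasing_by
  have hmem : "|" ∈ tokens :=
    (PySem.List.index?_isSome_iff (xs := tokens) (v := "|")).mp (by rw [h]; rfl)
  have hne : tokens ≠ [] := by intro hnil; subst hnil; simp at hmem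
  have hcast : ((i : Int) + 1) = ((i + 1 : Nat) : Int) := by push_cast; ring
  rw [hcast, PySem.List.slice_from_natCast, List.length_drop]
  have : 0 < tokens.length := List.length_pos_of_ne_nil hne
  omega

def parse_pipeline_alt (tokens : List String) : List (List String) :=
  if "|" ∉ tokens then [tokens] else pvSplit tokens

-- ===== PRECONDITION & SPEC =====
def Spec_parse_pipeline (tokens : List String) (out : List (List String)) : Prop := out = parse_pipeline_alt tokens
instance (tokens : List String) (out : List (List String)) : Decidable (Spec_parse_pipeline tokens out) := by unfold Spec_parse_pipeline; infer_instance

-- ===== CLAIM (what is proved, stated in full; the proofs are below) =====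
def Claim_equal_parse_pipeline : Prop := ∀ (tokens : List String), Dom_parse_pipeline tokens → Spec_parse_pipeline tokens (parse_pipeline tokens)

-- ===== LEMMAS AND PROOFS =====

-- common specification: segments between pipes, empty segments dropped
def pvSegs (l : List String) : List (List String) :=
  (List.splitOnP (fun t => t == "|") l).filter (fun c => !c.isEmpty)

lemma foldA (ts : List String) : ∀ acc cur : _,
    (let st := ts.foldl pvStepA (acc, cur)
     if st.2 ≠ [] then st.1 ++ [st.2] else st.1)
    = acc ++ (List.modifyHead (cur ++ ·) (List.splitOnP (fun t => t == "|") ts)).filter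
        (fun c => !c.isEmpty) := by
  induction ts with
  | nil =>
      intro acc cur
      by_cases hc : cur = [] <;> simp [hc]
  | cons t ts ih =>
      intro acc cur
      simp only [List.foldl_cons]
      by_cases ht : t = "|"
      · subst ht
        rw [show pvStepA (acc, cur) "|"
              = (if cur ≠ [] then acc ++ [cur] else acc, []) from by simp [pvStepA]]
        rw [ih]
        rw [List.splitOnP_cons]
        simp only [beq_self_eq_true, if_true]
        have hid : (fun x : List String => [] ++ x) = id := by funext x; simp
        rw [hid, List.modifyHead_id]
        by_cases hc : cur = [] <;> simp [hc, List.append_assoc]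
      · rw [show pvStepA (acc, cur) t = (acc, cur ++ [t]) from by simp [pvStepA, ht]]
        rw [ih]
        rw [List.splitOnP_cons]
        have hbt : (t == "|") = false := by simp [ht]
        rw [hbt]
        simp only [Bool.false_eq_true, if_false, List.modifyHead_modifyHead]
        have : ((fun x => cur ++ x) ∘ (List.cons t)) = (fun x => (cur ++ [t]) ++ x) := by
          funext x; simp
        rw [this]

lemma A_eq_segs (tokens : List String) (hmem : "|" ∈ tokens) :
    parse_pipeline tokens = pvSegs tokens := by
  unfold parse_pipeline
  rw [if_neg (by simpa using hmem)]
  have := foldA tokens [] []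
  simp only at this
  rw [this]
  have hid : (fun x : List String => [] ++ x) = id := by funext x; simp
  rw [hid, List.modifyHead_id]
  simp [pvSegs]

lemma splitOnP_no_pipe (l : List String) (h : "|" ∉ l) :
    List.splitOnP (fun t => t == "|") l = [l] := by
  induction l with
  | nil => simp
  | cons t ts ih =>
      have ht : t ≠ "|" := by intro e; exact h (e ▸ List.mem_cons_self ..)
      have hts : "|" ∉ ts := fun m => h (List.mem_cons_of_mem _ m)
      rw [List.splitOnP_cons]
      have hbt : (t == "|") = false := by simp [ht]
      rw [hbt]
      simp [ih hts]

lemma splitOnP_pre (pre suf : List String) (h : "|" ∉ pre) :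
    List.splitOnP (fun t => t == "|") (pre ++ "|" :: suf)
      = pre :: List.splitOnP (fun t => t == "|") suf := by
  induction pre with
  | nil => simp [List.splitOnP_cons]
  | cons a pre ih =>
      have ha : a ≠ "|" := by intro e; exact h (e ▸ List.mem_cons_self ..)
      have hpre : "|" ∉ pre := fun m => h (List.mem_cons_of_mem _ m)
      rw [List.cons_append, List.splitOnP_cons]
      have hba : (a == "|") = false := by simp [ha]
      rw [hba]
      simp [ih hpre]

lemma B_eq_segs (tokens : List String) : pvSplit tokens = pvSegs tokens := by
  fun_induction pvSplit tokens with
  | case1 tokens h hne =>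
      have hnm : "|" ∉ tokens :=
        (PySem.List.index?_eq_none_iff (xs := tokens) (v := "|")).mp h
      rw [pvSegs, splitOnP_no_pipe tokens hnm]
      simp [hne]
  | case2 tokens h hne =>
      have hn : tokens = [] := by simpa using hne
      subst hn
      simp [pvSegs]
  | case3 tokens i h head rest hh ih =>
      obtain ⟨pre, suf, hsplit, hlen, hnp⟩ :=
        (PySem.List.index?_eq_some_iff (xs := tokens) (v := "|") (k := i)).mp h
      have hcast : ((i : Int) + 1) = ((i + 1 : Nat) : Int) := by push_cast; ring
      have hhead : head = pre := by
        show PySem.List.slice tokens none (some (i : Int)) = pre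
        rw [← hlen, PySem.List.slice_to_natCast, hsplit]
        exact List.take_left
      have hsuf : PySem.List.slice tokens (some ((i : Int) + 1)) none = suf := by
        rw [hcast, PySem.List.slice_from_natCast, hsplit, ← hlen]
        rw [show pre.length + 1 = (pre ++ ["|"]).length by simp]
        rw [show pre ++ "|" :: suf = (pre ++ ["|"]) ++ suf by simp]
        exact List.drop_left
      rw [hsuf] at ih
      have hrest : rest = pvSegs suf := by
        show pvSplit (PySem.List.slice tokens (some ((i : Int) + 1)) none) = pvSegs suf
        rw [hsuf]; exact ih
      have hp : pre ≠ [] := by rw [hhead] at hh; exact hh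
      have hsegs : pvSegs (pre ++ "|" :: suf)
          = pre :: (List.splitOnP (fun t => t == "|") suf).filter (fun c => !c.isEmpty) := by
        rw [pvSegs, splitOnP_pre pre suf hnp, List.filter_cons]
        simp [hp]
      rw [hhead, hrest, hsplit, hsegs, pvSegs]
  | case4 tokens i h head rest hh ih =>
      obtain ⟨pre, suf, hsplit, hlen, hnp⟩ :=
        (PySem.List.index?_eq_some_iff (xs := tokens) (v := "|") (k := i)).mp h
      have hcast : ((i : Int) + 1) = ((i + 1 : Nat) : Int) := by push_cast; ring
      have hhead : head = pre := by
        show PySem.List.slice tokens none (some (i : Int)) = pre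
        rw [← hlen, PySem.List.slice_to_natCast, hsplit]
        exact List.take_left
      have hsuf : PySem.List.slice tokens (some ((i : Int) + 1)) none = suf := by
        rw [hcast, PySem.List.slice_from_natCast, hsplit, ← hlen]
        rw [show pre.length + 1 = (pre ++ ["|"]).length by simp]
        rw [show pre ++ "|" :: suf = (pre ++ ["|"]) ++ suf by simp]
        exact List.drop_left
      rw [hsuf] at ih
      have hrest : rest = pvSegs suf := by
        show pvSplit (PySem.List.slice tokens (some ((i : Int) + 1)) none) = pvSegs suf
        rw [hsuf]; exact ih
      have hp : pre = [] := by rw [hhead] at hh; simpa using hh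
      have hsegs : pvSegs (pre ++ "|" :: suf)
          = (List.splitOnP (fun t => t == "|") suf).filter (fun c => !c.isEmpty) := by
        rw [pvSegs, splitOnP_pre pre suf hnp, List.filter_cons]
        simp [hp]
      rw [hrest, hsplit, hsegs, pvSegs]

-- ===== VERDICT (by name: the statement is the Claim_ definition above) =====
theorem parse_pipeline_spec : Claim_equal_parse_pipeline := by
  intro tokens _
  unfold Spec_parse_pipeline parse_pipeline_alt
  by_cases hmem : "|" ∈ tokens
  · rw [if_neg (by simpa using hmem), A_eq_segs tokens hmem, B_eq_segs]
  · unfold parse_pipeline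
    rw [if_pos (by simpa using hmem), if_pos (by simpa using hmem)]
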